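-- pv_equiv track=rewrite | github.com/gregdan3/ilo-pi-toki-pona-taso | src/tenpo/str_utils.py | format_reacts
-- ===== SOURCE A (Python) =====
-- def format_reacts(reacts: list[str], per_line: int = 8) -> str:
--     formatted_reacts = ""
--     for i, react in enumerate(reacts):
--         formatted_reacts += react
--         if (i + 1) % per_line == 0:
--             formatted_reacts += "\n"
--         else:
--             formatted_reacts += " "
--
--     return formatted_reacts.rstrip()
-- ===== SOURCE B (Python) =====
-- def format_reacts(reacts: list[str], per_line: int = 8) -> str:
--     # Group reacts into lines first, then join; same result as the flat loop after rstrip.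
--     lines = []
--     cur = []
--     for react in reacts:
--         cur.append(react)
--         if len(cur) == per_line:
--             lines.append(" ".join(cur))
--             cur = []
--     if cur:
--         lines.append(" ".join(cur))
--     return "\n".join(lines).rstrip()
-- ===== Notes on version B (the rewrite author's own statement) =====
-- stated objective: simpler
-- what changed: A builds one flat string by repeated += with a per-item index-modulo choice of separator; B groups the reacts into per-line chunks and uses str.join for each line and for the whole, a constant-factor win from C-level join over repeated concatenation.
-- outside the precondition, e.g. on format_reacts(['a', 'b'], -1): A returns 'a\nb', B returns 'a b'
import Mathlib
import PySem

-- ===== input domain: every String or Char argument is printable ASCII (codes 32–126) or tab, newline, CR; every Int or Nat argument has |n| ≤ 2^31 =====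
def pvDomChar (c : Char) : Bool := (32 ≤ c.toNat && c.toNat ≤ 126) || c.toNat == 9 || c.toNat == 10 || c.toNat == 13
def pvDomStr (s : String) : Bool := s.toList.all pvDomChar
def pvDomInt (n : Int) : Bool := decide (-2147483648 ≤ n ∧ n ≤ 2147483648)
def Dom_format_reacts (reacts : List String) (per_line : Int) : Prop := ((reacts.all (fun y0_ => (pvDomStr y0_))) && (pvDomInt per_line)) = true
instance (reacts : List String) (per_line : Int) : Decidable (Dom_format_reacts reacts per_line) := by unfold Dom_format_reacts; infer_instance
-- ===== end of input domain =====

-- B replaces A's flat string accumulation (separator chosen by an index-modulo test) with a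
-- group-into-lines-then-join decomposition (simpler); equal on per_line ≥ 1 (and on empty input).

-- ===== PORT A =====
def format_reacts (reacts : List String) (per_line : Int) : String :=
  PySem.Str.rstrip
    ((PySem.List.enumerate reacts).foldl
      (fun acc p =>
        let acc2 := acc ++ p.2
        if PySem.Int.mod (p.1 + 1) per_line == 0 then acc2 ++ "\n" else acc2 ++ " ")
      "")

-- ===== PORT B =====
def format_reacts_alt (reacts : List String) (per_line : Int) : String :=
  let st := reacts.foldl
    (fun (st : List String × List String) react =>
      let cur := st.2 ++ [react]
      if ((cur.length : Int) == per_line) then (st.1 ++ [PySem.Str.join " " cur], [])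
      else (st.1, cur))
    (([], []) : List String × List String)
  let lines := if st.2 = [] then st.1 else st.1 ++ [PySem.Str.join " " st.2]
  PySem.Str.rstrip (PySem.Str.join "\n" lines)

-- ===== PRECONDITION & SPEC =====
-- Pre_ excludes non-positive per_line with more reacts than |per_line|: there A raises
-- ZeroDivisionError (per_line = 0) or breaks lines as if per_line were |per_line| (an accident
-- of the sign-blind modulo test), while B returns a single line.
def Pre_format_reacts (reacts : List String) (per_line : Int) : Prop :=
  reacts = [] ∨ 1 ≤ per_line ∨ (reacts.length : Int) ≤ -per_line
instance (reacts : List String) (per_line : Int) : Decidable (Pre_format_reacts reacts per_line) := by unfold Pre_format_reacts; infer_instance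
def pvWitness_format_reacts : List String × Int := (["ok", "mu", "a"], 2)

def Spec_format_reacts (reacts : List String) (per_line : Int) (out : String) : Prop := out = format_reacts_alt reacts per_line
instance (reacts : List String) (per_line : Int) (out : String) : Decidable (Spec_format_reacts reacts per_line out) := by unfold Spec_format_reacts; infer_instance

-- ===== CLAIM (what is proved, stated in full; the proofs are below) =====
def Claim_equal_format_reacts : Prop := ∀ (reacts : List String) (per_line : Int), Dom_format_reacts reacts per_line → Pre_format_reacts reacts per_line → Spec_format_reacts reacts per_line (format_reacts reacts per_line)

-- ===== LEMMAS AND PROOFS =====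

-- what A's accumulator holds when B's state is (lines, cur)
def renderSt (st : List String × List String) : List Char :=
  (st.1.map (fun l => l.toList ++ ['\n'])).flatten ++
    (if st.2 = [] then [] else PySem.Chars.join [' '] (st.2.map String.toList) ++ [' '])

lemma join_snoc (sep : List Char) (l : List (List Char)) (y : List Char) :
    PySem.Chars.join sep (l ++ [y]) =
      if l = [] then y else PySem.Chars.join sep l ++ sep ++ y := by
  induction l with
  | nil => simp [PySem.Chars.join, List.intercalate]
  | cons x xs ih =>
    cases xs with
    | nil => simp [PySem.Chars.join, List.intercalate]
    | cons z zs =>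
      simp only [List.cons_append, PySem.Chars.join_cons_cons] at *
      simp [ih, List.append_assoc]

lemma flat_lines (ls : List String) :
    (ls.map (fun l => l.toList ++ ['\n'])).flatten =
      if ls = [] then [] else PySem.Chars.join ['\n'] (ls.map String.toList) ++ ['\n'] := by
  induction ls with
  | nil => simp
  | cons x xs ih =>
    cases xs with
    | nil => simp [PySem.Chars.join, List.intercalate]
    | cons z zs =>
      simp only [List.map_cons, List.flatten_cons, PySem.Chars.join_cons_cons] at *
      simp [ih, List.append_assoc]

lemma rstrip_snoc_ws (s : List Char) (c : Char) (h : PySem.Chars.isspace c = true) :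
    PySem.Chars.rstrip (s ++ [c]) = PySem.Chars.rstrip s := by
  simp [PySem.Chars.rstrip, List.dropWhile_cons_of_pos, h]

lemma render_push (lines cur : List String) (r : String) :
    renderSt (lines, cur ++ [r]) = renderSt (lines, cur) ++ r.toList ++ [' '] := by
  unfold renderSt
  rw [if_neg (by simp), List.map_append, List.map_singleton, join_snoc]
  cases cur with
  | nil => simp
  | cons x xs => rw [if_neg (by simp)]; simp [List.append_assoc]

lemma render_flush (lines cur : List String) (r : String) :
    renderSt (lines ++ [PySem.Str.join " " (cur ++ [r])], []) =
      renderSt (lines, cur) ++ r.toList ++ ['\n'] := by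
  dsimp only [renderSt]
  rw [if_pos rfl, List.map_append, List.map_singleton, List.flatten_append]
  have hj : (PySem.Str.join " " (cur ++ [r])).toList
      = PySem.Chars.join [' '] ((cur ++ [r]).map String.toList) := by
    simp [PySem.Str.join, String.toList_ofList]
  simp only [List.flatten_cons, List.flatten_nil, hj]
  rw [List.map_append, List.map_singleton, join_snoc]
  cases cur with
  | nil => simp
  | cons x xs => rw [if_neg (by simp)]; simp [List.append_assoc]

lemma rstrip_render (lines cur : List String) :
    PySem.Chars.rstrip (renderSt (lines, cur)) =
      PySem.Chars.rstrip (PySem.Chars.join ['\n']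
        ((if cur = [] then lines else lines ++ [PySem.Str.join " " cur]).map String.toList)) := by
  cases cur with
  | nil =>
    dsimp only [renderSt]
    rw [if_pos rfl, if_pos rfl, List.append_nil, flat_lines]
    cases lines with
    | nil => simp [PySem.Chars.join, List.intercalate]
    | cons x xs => rw [if_neg (by simp)]; exact rstrip_snoc_ws _ '\n' (by decide)
  | cons c cs =>
    dsimp only [renderSt]
    rw [if_neg (by simp), if_neg (by simp)]
    rw [← List.append_assoc, rstrip_snoc_ws _ ' ' (by decide)]
    rw [flat_lines, List.map_append, List.map_singleton, join_snoc]
    have hj : (PySem.Str.join " " (c :: cs)).toList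
        = PySem.Chars.join [' '] ((c :: cs).map String.toList) := by
      simp [PySem.Str.join, String.toList_ofList]
    cases lines with
    | nil => simp [hj]
    | cons x xs => rw [if_neg (by simp), if_neg (by simp), hj, List.append_assoc]

-- the two loops, run in lockstep
lemma loop_eq (per_line : Int) (hp : 1 ≤ per_line) (rs : List String) :
    ∀ (lines cur : List String) (acc : String),
      ((cur.length : Int) < per_line) →
      acc.toList = renderSt (lines, cur) →
      ((PySem.List.enumerate rs (per_line * lines.length + cur.length)).foldl
          (fun acc p =>
            let acc2 := acc ++ p.2
            if PySem.Int.mod (p.1 + 1) per_line == 0 then acc2 ++ "\n" else acc2 ++ " ")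
          acc).toList
        = renderSt (rs.foldl
            (fun (st : List String × List String) react =>
              let cur := st.2 ++ [react]
              if ((cur.length : Int) == per_line) then (st.1 ++ [PySem.Str.join " " cur], [])
              else (st.1, cur))
            (lines, cur)) := by
  induction rs with
  | nil => intro lines cur acc _ hacc; simpa [PySem.List.enumerate_nil] using hacc
  | cons r rs ih =>
    intro lines cur acc hlt hacc
    rw [PySem.List.enumerate_cons, List.foldl_cons, List.foldl_cons]
    by_cases hc : (cur.length : Int) + 1 = per_line
    · have hm : PySem.Int.mod (per_line * lines.length + (cur.length : Int) + 1) per_line = 0 := by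
        rw [PySem.Int.mod_eq_zero_iff_dvd, add_assoc]
        exact (Int.dvd_add_right (dvd_mul_right _ _)).mpr ⟨1, by rw [mul_one]; omega⟩
      have hlen : ((cur ++ [r]).length : Int) = (cur.length : Int) + 1 := by simp
      have hcB : (((cur ++ [r]).length : Int) == per_line) = true := by
        rw [hlen]; exact beq_iff_eq.mpr hc
      simp only [hm, beq_self_eq_true, if_true, hcB]
      have hidx : per_line * (lines.length : Int) + (cur.length : Int) + 1
          = per_line * ((lines ++ [PySem.Str.join " " (cur ++ [r])]).length : Int) + ([] : List String).length := by
        simp only [List.length_append, List.length_cons, List.length_nil]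
        push_cast
        rw [mul_add, mul_one, ← hc]
        ring
      rw [hidx]
      apply ih
      · simpa using hp
      · rw [render_flush, ← hacc]; simp
    · have hm : PySem.Int.mod (per_line * lines.length + (cur.length : Int) + 1) per_line ≠ 0 := by
        rw [Ne, PySem.Int.mod_eq_zero_iff_dvd]
        intro hdvd
        rw [add_assoc] at hdvd
        have h2 : per_line ∣ (cur.length : Int) + 1 :=
          (Int.dvd_add_right (dvd_mul_right per_line (lines.length : Int))).mp hdvd
        have hpos : (0 : Int) < (cur.length : Int) + 1 := by positivity
        have := Int.le_of_dvd hpos h2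
        omega
      have hlen : ((cur ++ [r]).length : Int) = (cur.length : Int) + 1 := by simp
      have hmB : (PySem.Int.mod (per_line * lines.length + (cur.length : Int) + 1) per_line == 0) = false :=
        beq_eq_false_iff_ne.mpr hm
      have hcB : (((cur ++ [r]).length : Int) == per_line) = false := by
        rw [hlen]; exact beq_eq_false_iff_ne.mpr hc
      simp only [hmB, hcB, Bool.false_eq_true, if_false]
      have hidx : per_line * (lines.length : Int) + (cur.length : Int) + 1
          = per_line * (lines.length : Int) + ((cur ++ [r]).length : Int) := by
        rw [hlen]; exact add_assoc _ _ _
      rw [hidx]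
      apply ih
      · rw [hlen]; omega
      · rw [render_push, ← hacc]; simp

-- B's final line list, as the let-block of format_reacts_alt computes it
def finB (st : List String × List String) : List String :=
  if st.2 = [] then st.1 else st.1 ++ [PySem.Str.join " " st.2]

lemma equal_of_pos (reacts : List String) (per_line : Int) (hp : 1 ≤ per_line) :
    format_reacts reacts per_line = format_reacts_alt reacts per_line := by
  apply String.toList_inj.mp
  unfold format_reacts format_reacts_alt
  simp only [PySem.Str.toList_rstrip]
  have h0 : per_line * (([] : List String).length : Int) + (([] : List String).length : Int) = 0 := by
    simp
  have := loop_eq per_line hp reacts [] [] "" (by simpa using hp) (by simp [renderSt])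
  rw [h0] at this
  rw [this, rstrip_render]
  congr 1
  simp [PySem.Str.join, String.toList_ofList]

-- A only tests divisibility, so the sign of per_line is invisible to it
lemma portA_neg (reacts : List String) (per_line : Int) :
    format_reacts reacts per_line = format_reacts reacts (-per_line) := by
  unfold format_reacts
  have hfun : (fun (acc : String) (p : Int × String) =>
        let acc2 := acc ++ p.2
        if PySem.Int.mod (p.1 + 1) per_line == 0 then acc2 ++ "\n" else acc2 ++ " ")
      = (fun (acc : String) (p : Int × String) =>
        let acc2 := acc ++ p.2
        if PySem.Int.mod (p.1 + 1) (-per_line) == 0 then acc2 ++ "\n" else acc2 ++ " ") := by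
    funext acc p
    have hmod : (PySem.Int.mod (p.1 + 1) per_line == 0)
        = (PySem.Int.mod (p.1 + 1) (-per_line) == 0) := by
      by_cases h : per_line ∣ p.1 + 1
      · rw [beq_iff_eq.mpr ((PySem.Int.mod_eq_zero_iff_dvd _ _).mpr h),
          beq_iff_eq.mpr ((PySem.Int.mod_eq_zero_iff_dvd _ _).mpr (neg_dvd.mpr h))]
      · rw [beq_eq_false_iff_ne.mpr (fun e => h ((PySem.Int.mod_eq_zero_iff_dvd _ _).mp e)),
          beq_eq_false_iff_ne.mpr
            (fun e => h (neg_dvd.mp ((PySem.Int.mod_eq_zero_iff_dvd _ _).mp e)))]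
    simp only [hmod]
  rw [hfun]

-- with a negative per_line, B's loop never flushes
lemma foldB_neg (per_line : Int) (hp : per_line ≤ -1) (rs : List String) :
    ∀ (lines cur : List String),
      rs.foldl
        (fun (st : List String × List String) react =>
          let cur := st.2 ++ [react]
          if ((cur.length : Int) == per_line) then (st.1 ++ [PySem.Str.join " " cur], [])
          else (st.1, cur))
        (lines, cur) = (lines, cur ++ rs) := by
  induction rs with
  | nil => intro lines cur; simp
  | cons r rs ih =>
    intro lines cur
    rw [List.foldl_cons]
    have hcB : (((cur ++ [r]).length : Int) == per_line) = false :=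
      beq_eq_false_iff_ne.mpr (by have := Int.natCast_nonneg (cur ++ [r]).length; omega)
    simp only [hcB, Bool.false_eq_true, if_false]
    rw [ih]; simp

-- when everything fits in one line, B's loop flushes at most once, at the very end
lemma foldB_fill (per_line : Int) (rs : List String) :
    ∀ (lines cur : List String),
      (cur.length : Int) + rs.length ≤ per_line →
      finB (rs.foldl
        (fun (st : List String × List String) react =>
          let cur := st.2 ++ [react]
          if ((cur.length : Int) == per_line) then (st.1 ++ [PySem.Str.join " " cur], [])
          else (st.1, cur))
        (lines, cur)) = finB (lines, cur ++ rs) := by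
  induction rs with
  | nil => intro lines cur _; simp
  | cons r rs ih =>
    intro lines cur hle
    rw [List.foldl_cons]
    have hlen : ((cur ++ [r]).length : Int) = (cur.length : Int) + 1 := by simp
    by_cases hc : (cur.length : Int) + 1 = per_line
    · have hrs : rs = [] := by
        cases rs with
        | nil => rfl
        | cons z zs => exfalso; simp only [List.length_cons] at hle; push_cast at hle; omega
      subst hrs
      have hcB : (((cur ++ [r]).length : Int) == per_line) = true := by
        rw [hlen]; exact beq_iff_eq.mpr hc
      simp only [hcB, if_true, List.foldl_nil]
      unfold finB
      rw [if_pos rfl, if_neg (by simp)]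
    · have hcB : (((cur ++ [r]).length : Int) == per_line) = false := by
        rw [hlen]; exact beq_eq_false_iff_ne.mpr hc
      simp only [hcB, Bool.false_eq_true, if_false]
      rw [show cur ++ r :: rs = (cur ++ [r]) ++ rs by simp]
      apply ih
      rw [hlen]
      simp only [List.length_cons] at hle
      push_cast at hle ⊢
      omega

-- B's result through finB (definitional repackaging of the let-block)
lemma altB_eq (reacts : List String) (per_line : Int) :
    format_reacts_alt reacts per_line
      = PySem.Str.rstrip (PySem.Str.join "\n" (finB (reacts.foldl
          (fun (st : List String × List String) react =>
            let cur := st.2 ++ [react]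
            if ((cur.length : Int) == per_line) then (st.1 ++ [PySem.Str.join " " cur], [])
            else (st.1, cur))
          ([], [])))) := rfl

-- ===== VERDICT (by name: the statement is the Claim_ definition above) =====
theorem format_reacts_spec : Claim_equal_format_reacts := by
  intro reacts per_line _ hpre
  unfold Spec_format_reacts
  rcases hpre with hnil | hp | hfit
  · subst hnil; rfl
  · exact equal_of_pos reacts per_line hp
  · rcases eq_or_ne reacts [] with hnil | hne
    · subst hnil; rfl
    · have hlen1 : 1 ≤ (reacts.length : Int) := by
        have : reacts.length ≠ 0 := fun h => hne (List.length_eq_zero_iff.mp h)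
        omega
      have hp : per_line ≤ -1 := by omega
      rw [portA_neg, equal_of_pos reacts (-per_line) (by omega)]
      rw [altB_eq, altB_eq]
      rw [foldB_neg per_line hp, foldB_fill (-per_line) reacts [] [] (by simpa using hfit)]
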